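-- pv_equiv track=rewrite | github.com/RimorRes/B-Code | bcode/braille_editor.py | text_to_braille_grid
-- ===== SOURCE A (Python) =====
-- BRAILLE_MAP = {
--     'a': '⠁', 'b': '⠃', 'c': '⠉', 'd': '⠙', 'e': '⠑',
--     'f': '⠋', 'g': '⠛', 'h': '⠓', 'i': '⠊', 'j': '⠚',
--     'k': '⠅', 'l': '⠇', 'm': '⠍', 'n': '⠝', 'o': '⠕',
--     'p': '⠏', 'q': '⠟', 'r': '⠗', 's': '⠎', 't': '⠞',
--     'u': '⠥', 'v': '⠧', 'w': '⠺', 'x': '⠭', 'y': '⠽', 'z': '⠵',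
--     '0': '⠴', '1': '⠂', '2': '⠆', '3': '⠒', '4': '⠲',
--     '5': '⠢', '6': '⠖', '7': '⠶', '8': '⠦', '9': '⠔',
--     ' ': '⠀', ',': '⠂', ';': '⠆', ':': '⠒', '.': '⠲',
--     '!': '⠖', '(': '⠶', ')': '⠶', '?': '⠦', "'": '⠄',
--     '-': '⠤', '\n': '\n',
-- }
--
-- NUMBER_PREFIX = '⠼'
--
-- CAPITAL_PREFIX = '⠠'
--
-- def text_to_braille(text: str) -> str:
--     """Convert plain text to Grade 1 braille Unicode."""
--     result = []
--     in_number = False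
--     for char in text:
--         if char.isdigit():
--             if not in_number:
--                 result.append(NUMBER_PREFIX)
--                 in_number = True
--             result.append(BRAILLE_MAP.get(char, '?'))
--         else:
--             in_number = False
--             if char.isupper():
--                 result.append(CAPITAL_PREFIX)
--                 result.append(BRAILLE_MAP.get(char.lower(), '?'))
--             else:
--                 result.append(BRAILLE_MAP.get(char, '?'))
--     return ''.join(result)
--
-- def text_to_braille_grid(text: str, max_cells_per_line: int | None = None) -> list[list[str]]:
--     """
--     Returns a list of rows, each row a list of single braille Unicode chars.
--     Converts each input line to braille first, then splits into individual cells
--     so prefixes (capital ⠠, number ⠼) each occupy their own grid cell.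
--     """
--     result = []
--     wrap_width = max_cells_per_line if max_cells_per_line and max_cells_per_line > 0 else None
--
--     space_cell = BRAILLE_MAP[' ']
--
--     for line in text.split('\n'):
--         braille_str = text_to_braille(line)
--         row = list(braille_str)
--
--         if wrap_width is None:
--             result.append(row)
--             continue
--
--         if not row:
--             result.append([])
--             continue
--
--         remaining = row
--         while len(remaining) > wrap_width:
--             split_at = -1
--             for i in range(wrap_width - 1, -1, -1):
--                 if remaining[i] == space_cell:
--                     split_at = i
--                     break
--
--             if split_at <= 0:
--                 result.append(remaining[:wrap_width])
--                 remaining = remaining[wrap_width:]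
--                 continue
--
--             result.append(remaining[:split_at])
--             remaining = remaining[split_at + 1:]
--
--             # Avoid carrying wrap-boundary spaces to the start of the next line.
--             while remaining and remaining[0] == space_cell:
--                 remaining = remaining[1:]
--
--         result.append(remaining)
--
--     if not result:
--         result.append([])
--
--     return result
-- ===== SOURCE B (Python) =====
-- BRAILLE_MAP = {
--     'a': '⠁', 'b': '⠃', 'c': '⠉', 'd': '⠙', 'e': '⠑',
--     'f': '⠋', 'g': '⠛', 'h': '⠓', 'i': '⠊', 'j': '⠚',
--     'k': '⠅', 'l': '⠇', 'm': '⠍', 'n': '⠝', 'o': '⠕',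
--     'p': '⠏', 'q': '⠟', 'r': '⠗', 's': '⠎', 't': '⠞',
--     'u': '⠥', 'v': '⠧', 'w': '⠺', 'x': '⠭', 'y': '⠽', 'z': '⠵',
--     '0': '⠴', '1': '⠂', '2': '⠆', '3': '⠒', '4': '⠲',
--     '5': '⠢', '6': '⠖', '7': '⠶', '8': '⠦', '9': '⠔',
--     ' ': '⠀', ',': '⠂', ';': '⠆', ':': '⠒', '.': '⠲',
--     '!': '⠖', '(': '⠶', ')': '⠶', '?': '⠦', "'": '⠄',
--     '-': '⠤', '\n': '\n',
-- }
--
-- NUMBER_PREFIX = '⠼'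
--
-- CAPITAL_PREFIX = '⠠'
--
-- SPACE_CELL = BRAILLE_MAP[' ']
--
--
-- def text_to_braille(text: str) -> str:
--     """Convert plain text to Grade 1 braille Unicode."""
--     result = []
--     in_number = False
--     for char in text:
--         if char.isdigit():
--             if not in_number:
--                 result.append(NUMBER_PREFIX)
--                 in_number = True
--             result.append(BRAILLE_MAP.get(char, '?'))
--         else:
--             in_number = False
--             if char.isupper():
--                 result.append(CAPITAL_PREFIX)
--                 result.append(BRAILLE_MAP.get(char.lower(), '?'))
--             else:
--                 result.append(BRAILLE_MAP.get(char, '?'))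
--     return ''.join(result)
--
--
-- def _wrap_cells(cells, width):
--     """Single forward pass: buffer a line, remember the last space cell seen,
--     break greedily when the buffer is full and another cell arrives."""
--     rows = []
--     buf = []
--     last_space = -1          # index of the last space cell in buf, -1 if none
--     skip = False             # dropping spaces right after a soft break
--     for cell in cells:
--         if len(buf) == width:
--             if last_space > 0:
--                 rows.append(buf[:last_space])
--                 buf = buf[last_space + 1:]
--                 skip = not buf
--             else:
--                 rows.append(buf)
--                 buf = []
--             last_space = -1
--         if skip:
--             if cell == SPACE_CELL:
--                 continue
--             skip = False
--         if cell == SPACE_CELL: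
--             last_space = len(buf)
--         buf.append(cell)
--     rows.append(buf)
--     return rows
--
--
-- def text_to_braille_grid(text: str, max_cells_per_line: int | None = None) -> list[list[str]]:
--     width = max_cells_per_line if max_cells_per_line and max_cells_per_line > 0 else None
--     grid = []
--     for line in text.split('\n'):
--         cells = list(text_to_braille(line))
--         if width is None:
--             grid.append(cells)
--         else:
--             grid.extend(_wrap_cells(cells, width))
--     return grid
-- ===== Notes on version B (the rewrite author's own statement) =====
-- stated objective: alternative
-- what changed: The word-wrap while-loop that repeatedly scans backward for the last space and re-slices the remainder is replaced by a single forward pass over the cell list that buffers the current line, tracks the index of the last space seen, and emits rows as it goes.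
import Mathlib
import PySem

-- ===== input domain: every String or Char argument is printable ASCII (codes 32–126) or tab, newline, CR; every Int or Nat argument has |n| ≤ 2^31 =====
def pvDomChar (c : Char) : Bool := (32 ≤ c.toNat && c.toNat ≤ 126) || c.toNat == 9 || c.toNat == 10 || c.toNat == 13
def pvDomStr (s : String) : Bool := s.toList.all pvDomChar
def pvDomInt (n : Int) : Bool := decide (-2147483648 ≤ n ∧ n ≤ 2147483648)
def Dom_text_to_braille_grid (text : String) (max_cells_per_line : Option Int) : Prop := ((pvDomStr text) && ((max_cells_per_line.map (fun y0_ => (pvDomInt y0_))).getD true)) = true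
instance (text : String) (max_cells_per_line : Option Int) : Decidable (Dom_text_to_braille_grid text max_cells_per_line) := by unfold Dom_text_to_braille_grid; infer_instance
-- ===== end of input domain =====

-- B replaces A's repeated backward-scan-and-slice word-wrap while-loop by a single forward
-- pass over the cell list that tracks the last space cell seen (objective: alternative).

-- ===== PORT A =====
-- shared module constants/helper (identical source lines in Source A and Source B)
def pvBrailleMap : PySem.Dict Char (List Char) := PySem.Dict.mk
  [('a', ['⠁']), ('b', ['⠃']), ('c', ['⠉']), ('d', ['⠙']), ('e', ['⠑']),
   ('f', ['⠋']), ('g', ['⠛']), ('h', ['⠓']), ('i', ['⠊']), ('j', ['⠚']),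
   ('k', ['⠅']), ('l', ['⠇']), ('m', ['⠍']), ('n', ['⠝']), ('o', ['⠕']),
   ('p', ['⠏']), ('q', ['⠟']), ('r', ['⠗']), ('s', ['⠎']), ('t', ['⠞']),
   ('u', ['⠥']), ('v', ['⠧']), ('w', ['⠺']), ('x', ['⠭']), ('y', ['⠽']), ('z', ['⠵']),
   ('0', ['⠴']), ('1', ['⠂']), ('2', ['⠆']), ('3', ['⠒']), ('4', ['⠲']),
   ('5', ['⠢']), ('6', ['⠖']), ('7', ['⠶']), ('8', ['⠦']), ('9', ['⠔']),
   (' ', ['⠀']), (',', ['⠂']), (';', ['⠆']), (':', ['⠒']), ('.', ['⠲']),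
   ('!', ['⠖']), ('(', ['⠶']), (')', ['⠶']), ('?', ['⠦']), ('\'', ['⠄']),
   ('-', ['⠤']), ('\n', ['\n'])]

def pvNumberPrefix : List Char := ['⠼']
def pvCapitalPrefix : List Char := ['⠠']

-- text_to_braille on the char-list level (the `result` list of appended strings, joined by '')
def text_to_braille_chars (text : List Char) : List Char :=
  PySem.Chars.join []
    (text.foldl (fun (st : List (List Char) × Bool) char =>
      let result := st.1
      let in_number := st.2
      if PySem.Chars.isdigit char then
        let result := if in_number then result else result ++ [pvNumberPrefix]
        (result ++ [pvBrailleMap.getD char ['?']], true)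
      else
        if PySem.Chars.isupper char then
          (result ++ [pvCapitalPrefix] ++ [pvBrailleMap.getD (PySem.Chars.lowerChar char) ['?']], false)
        else
          (result ++ [pvBrailleMap.getD char ['?']], false)) ([], false)).1

-- space_cell = BRAILLE_MAP[' '] (the key is present, so the Python dict access returns this cell)
def pvSpaceCell : String := "⠀"

-- the inner `for i in range(wrap_width - 1, -1, -1): if remaining[i] == space_cell: split_at = i; break`
-- (getD is exact here: every call site has i < remaining.length)
def pvLastSpaceBelow (remaining : List String) : Nat → Int
  | 0 => -1
  | i + 1 => if remaining.getD i "" == pvSpaceCell then (i : Int) else pvLastSpaceBelow remaining i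

-- the `while len(remaining) > wrap_width:` loop, plus the final `result.append(remaining)`
def pvWrapA (w : Nat) (remaining : List String) : List (List String) :=
  if h0 : w = 0 then [remaining]   -- totality guard only; every call site has 1 ≤ w
  else if h1 : remaining.length ≤ w then [remaining]
  else
    let s := pvLastSpaceBelow remaining w
    if s ≤ 0 then
      remaining.take w :: pvWrapA w (remaining.drop w)
    else
      remaining.take s.toNat ::
        pvWrapA w (List.dropWhile (· == pvSpaceCell) (remaining.drop (s.toNat + 1)))
termination_by remaining.length
decreasing_by
  · simp only [List.length_drop]; omega
  · have h2 := List.length_dropWhile_le (fun x => x == pvSpaceCell)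
      (List.drop ((pvLastSpaceBelow remaining w).toNat + 1) remaining)
    simp only [List.length_drop] at h2 ⊢
    omega

def text_to_braille_grid (text : String) (max_cells_per_line : Option Int) : List (List String) :=
  let wrap : Option Int := match max_cells_per_line with
    | none => none
    | some n => if n ≠ 0 ∧ 0 < n then some n else none
  let result := (PySem.Chars.splitOn text.toList ['\n']).foldl (fun result line =>
    let row := (text_to_braille_chars line).map (fun c => String.ofList [c])
    match wrap with
    | none => result ++ [row]
    | some n =>
      if row = [] then result ++ [[]]
      else result ++ pvWrapA n.toNat row) []
  if result = [] then [[]] else result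

-- ===== PORT B =====
-- one step of B's forward pass (the body of `for cell in cells` in _wrap_cells)
def pvStepB (w : Nat) (st : List (List String) × List String × Int × Bool) (cell : String) :
    List (List String) × List String × Int × Bool :=
  let st2 :=
    if st.2.1.length = w then
      if 0 < st.2.2.1 then
        let buf' := st.2.1.drop (st.2.2.1.toNat + 1)
        (st.1 ++ [st.2.1.take st.2.2.1.toNat], buf', (-1 : Int), buf'.isEmpty)
      else (st.1 ++ [st.2.1], ([] : List String), (-1 : Int), st.2.2.2)
    else st
  if st2.2.2.2 && cell == pvSpaceCell then st2
  else
    (st2.1, st2.2.1 ++ [cell],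
     if cell == pvSpaceCell then (st2.2.1.length : Int) else st2.2.2.1, false)

-- _wrap_cells: state (rows, buf, last_space, skip), then the final `rows.append(buf)`
def pvWrapB (w : Nat) (cells : List String) : List (List String) :=
  let st := cells.foldl (pvStepB w) ([], [], -1, false)
  st.1 ++ [st.2.1]

def text_to_braille_grid_alt (text : String) (max_cells_per_line : Option Int) : List (List String) :=
  let width : Option Int := match max_cells_per_line with
    | none => none
    | some n => if n ≠ 0 ∧ 0 < n then some n else none
  (PySem.Chars.splitOn text.toList ['\n']).foldl (fun grid line =>
    let cells := (text_to_braille_chars line).map (fun c => String.ofList [c])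
    match width with
    | none => grid ++ [cells]
    | some n => grid ++ pvWrapB n.toNat cells) []

-- ===== PRECONDITION & SPEC =====
def Spec_text_to_braille_grid (text : String) (max_cells_per_line : Option Int) (out : List (List String)) : Prop := out = text_to_braille_grid_alt text max_cells_per_line
instance (text : String) (max_cells_per_line : Option Int) (out : List (List String)) : Decidable (Spec_text_to_braille_grid text max_cells_per_line out) := by unfold Spec_text_to_braille_grid; infer_instance

-- ===== CLAIM (what is proved, stated in full; the proofs are below) =====
def Claim_equal_text_to_braille_grid : Prop := ∀ (text : String) (max_cells_per_line : Option Int), Dom_text_to_braille_grid text max_cells_per_line → Spec_text_to_braille_grid text max_cells_per_line (text_to_braille_grid text max_cells_per_line)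

-- ===== LEMMAS AND PROOFS =====

-- index of the last space cell of a buffer, -1 if none (the value B's `last_space` tracks)
def pvLsi : List String → Int
  | [] => -1
  | c :: cs => if pvSpaceCell ∈ cs then pvLsi cs + 1 else if c == pvSpaceCell then 0 else -1

theorem pvLsi_ge (buf : List String) : -1 ≤ pvLsi buf := by
  induction buf with
  | nil => simp [pvLsi]
  | cons c cs ih => simp only [pvLsi]; split_ifs <;> omega

theorem pvLsi_mem (buf : List String) : pvSpaceCell ∈ buf ↔ 0 ≤ pvLsi buf := by
  induction buf with
  | nil => simp [pvLsi]
  | cons c cs ih =>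
    simp only [pvLsi, List.mem_cons]
    by_cases hm : pvSpaceCell ∈ cs
    · have h0 : 0 ≤ pvLsi cs := ih.1 hm
      simp only [hm, if_true, or_true, true_iff]
      omega
    · have h0 := pvLsi_ge cs
      simp only [hm, if_false, or_false]
      by_cases hc : pvSpaceCell = c
      · simp [← hc]
      · have : (c == pvSpaceCell) = false := by simpa using Ne.symm hc
        simp [hc, this]

theorem pvLsi_lt (buf : List String) : pvLsi buf < buf.length := by
  induction buf with
  | nil => simp [pvLsi]
  | cons c cs ih => simp only [pvLsi, List.length_cons]; split_ifs <;> push_cast <;> omega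

theorem pvLsi_append (buf : List String) (c : String) :
    pvLsi (buf ++ [c]) = if c == pvSpaceCell then (buf.length : Int) else pvLsi buf := by
  induction buf with
  | nil => simp [pvLsi]
  | cons d ds ih =>
    by_cases hc : c = pvSpaceCell
    · subst hc
      simp only [List.cons_append, pvLsi, List.mem_append, List.mem_singleton, or_true,
        if_true, ih, beq_self_eq_true, List.length_cons]
      push_cast; ring
    · have hcb : (c == pvSpaceCell) = false := by simpa using hc
      simp only [hcb] at ih ⊢
      simp only [List.cons_append, pvLsi, List.mem_append, List.mem_singleton]
      by_cases hm : pvSpaceCell ∈ ds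
      · simp [hm, ih]
      · simp [hm, ih, Ne.symm hc]

theorem pvLsi_drop (buf : List String) : pvSpaceCell ∉ buf.drop ((pvLsi buf).toNat + 1) := by
  induction buf with
  | nil => simp
  | cons c cs ih =>
    simp only [pvLsi]
    by_cases hm : pvSpaceCell ∈ cs
    · have h0 : 0 ≤ pvLsi cs := (pvLsi_mem cs).1 hm
      simp only [hm, if_true]
      have : (pvLsi cs + 1).toNat + 1 = ((pvLsi cs).toNat + 1) + 1 := by omega
      rw [this, List.drop_succ_cons]
      exact ih
    · have h1 := pvLsi_ge cs
      simp only [hm, if_false]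
      split_ifs <;> simpa using hm

theorem pvLsi_of_not_mem {buf : List String} (h : pvSpaceCell ∉ buf) : pvLsi buf = -1 := by
  have h1 := (pvLsi_mem buf).not.1 h
  have h2 := pvLsi_ge buf
  omega

theorem pvLastSpaceBelow_eq (remaining : List String) :
    ∀ i, i ≤ remaining.length → pvLastSpaceBelow remaining i = pvLsi (remaining.take i) := by
  intro i
  induction i with
  | zero => intro _; simp [pvLastSpaceBelow, pvLsi]
  | succ j ih =>
    intro hle
    have hj : j < remaining.length := by omega
    have htake : remaining.take (j + 1) = remaining.take j ++ [remaining[j]] :=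
      List.take_succ_eq_append_getElem hj
    rw [pvLastSpaceBelow, htake, pvLsi_append, List.length_take_of_le (le_of_lt hj),
      List.getD_eq_getElem remaining "" hj, ih (le_of_lt hj)]

theorem pvLsi_singleton (cell : String) :
    pvLsi [cell] = if cell == pvSpaceCell then (0 : Int) else -1 := by
  simp [pvLsi]

-- the heart: B's forward pass computes exactly A's while-loop output
theorem pv_main (w : Nat) (hw : 1 ≤ w) :
    ∀ (rest : List String) (rows : List (List String)) (buf : List String) (skip : Bool),
    buf.length ≤ w → (skip = true → buf = []) →
    (rest.foldl (pvStepB w) (rows, buf, pvLsi buf, skip)).1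
      ++ [(rest.foldl (pvStepB w) (rows, buf, pvLsi buf, skip)).2.1]
    = rows ++ pvWrapA w (buf ++ (if skip then rest.dropWhile (· == pvSpaceCell) else rest)) := by
  intro rest
  induction rest with
  | nil =>
    intro rows buf skip hlen hskip
    have hA : pvWrapA w buf = [buf] := by
      unfold pvWrapA; rw [dif_neg (by omega), dif_pos hlen]
    cases skip with
    | false => simp [List.foldl_nil, hA]
    | true => simp [List.foldl_nil, hskip rfl, hskip rfl ▸ hA]
  | cons cell rest' ih =>
    intro rows buf skip hlen hskip
    rw [List.foldl_cons]
    have hw0 : ¬ ((0 : Nat) = w) := by omega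
    cases skip with
    | true =>
      -- stripping mode: buf = []
      have hbuf : buf = [] := hskip rfl
      subst hbuf
      rw [if_pos rfl]
      by_cases hc : cell == pvSpaceCell
      · -- drop the space, stay in stripping mode
        have hstep : pvStepB w (rows, [], pvLsi [], true) cell = (rows, [], pvLsi [], true) := by
          simp [pvStepB, pvLsi, hc, hw0]
        rw [hstep]
        have h2 := ih rows [] true (by simp only [List.length_nil]; omega) (fun _ => rfl)
        rw [if_pos rfl] at h2
        simpa [List.dropWhile_cons, hc] using h2
      · -- first real cell after the break
        have hstep : pvStepB w (rows, [], pvLsi [], true) cell = (rows, [cell], pvLsi [cell], false) := by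
          simp [pvStepB, pvLsi, hc, hw0]
        rw [hstep]
        have h2 := ih rows [cell] false (by simp only [List.length_cons, List.length_nil]; omega) (by simp)
        rw [if_neg (by simp)] at h2
        simpa [List.dropWhile_cons, hc] using h2
    | false =>
      rw [if_neg (by simp)]
      by_cases hfull : buf.length = w
      · -- buffer full: a break happens before this cell is placed
        have htake : (buf ++ cell :: rest').take w = buf := by
          rw [← hfull]; exact List.take_left
        have hsplit : pvLastSpaceBelow (buf ++ cell :: rest') w = pvLsi buf := by
          rw [pvLastSpaceBelow_eq _ w (by simp only [List.length_append, List.length_cons]; omega), htake]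
        by_cases hpos : 0 < pvLsi buf
        · -- soft break at the last space cell
          have htw : (pvLsi buf).toNat < w := by have := pvLsi_lt buf; omega
          have ht1 : 1 ≤ (pvLsi buf).toNat := by omega
          have hnc : pvSpaceCell ∉ buf.drop ((pvLsi buf).toNat + 1) := pvLsi_drop buf
          have hclen : (buf.drop ((pvLsi buf).toNat + 1)).length = w - ((pvLsi buf).toNat + 1) := by
            simp only [List.length_drop, hfull]
          have htk : (buf ++ cell :: rest').take (pvLsi buf).toNat = buf.take (pvLsi buf).toNat :=
            List.take_append_of_le_length (by omega)
          have hdr : (buf ++ cell :: rest').drop ((pvLsi buf).toNat + 1)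
              = buf.drop ((pvLsi buf).toNat + 1) ++ cell :: rest' :=
            List.drop_append_of_le_length (by omega)
          have hA : pvWrapA w (buf ++ cell :: rest')
              = buf.take (pvLsi buf).toNat ::
                pvWrapA w (List.dropWhile (· == pvSpaceCell)
                  (buf.drop ((pvLsi buf).toNat + 1) ++ cell :: rest')) := by
            rw [pvWrapA]
            rw [dif_neg (by omega),
              dif_neg (by simp only [List.length_append, List.length_cons]; omega)]
            simp only [hsplit]
            rw [if_neg (by omega), htk, hdr]
          rw [hA]
          cases hce : buf.drop ((pvLsi buf).toNat + 1) with
          | nil =>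
            -- the carry is empty: enter stripping mode
            by_cases hc : cell == pvSpaceCell
            · have hstep : pvStepB w (rows, buf, pvLsi buf, false) cell
                  = (rows ++ [buf.take (pvLsi buf).toNat], [], pvLsi [], true) := by
                simp [pvStepB, hfull, hpos, hce, pvLsi, hc]
              rw [hstep]
              have h2 := ih (rows ++ [buf.take (pvLsi buf).toNat]) [] true
                (by simp only [List.length_nil]; omega) (fun _ => rfl)
              rw [if_pos rfl] at h2
              simpa [List.dropWhile_cons, hc] using h2
            · have hstep : pvStepB w (rows, buf, pvLsi buf, false) cell
                  = (rows ++ [buf.take (pvLsi buf).toNat], [cell], pvLsi [cell], false) := by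
                simp [pvStepB, hfull, hpos, hce, pvLsi, hc]
              rw [hstep]
              have h2 := ih (rows ++ [buf.take (pvLsi buf).toNat]) [cell] false
                (by simp only [List.length_cons, List.length_nil]; omega) (by simp)
              rw [if_neg (by simp)] at h2
              simpa [List.dropWhile_cons, hc] using h2
          | cons d ds =>
            -- non-empty carry: it contains no space cell, so nothing is stripped
            rw [hce] at hnc hclen
            have hd : (d == pvSpaceCell) = false := by
              have : d ≠ pvSpaceCell := fun h => hnc (by simp [h])
              simpa using this
            have hlsic : pvLsi (d :: ds) = -1 := pvLsi_of_not_mem hnc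
            have hstep : pvStepB w (rows, buf, pvLsi buf, false) cell
                = (rows ++ [buf.take (pvLsi buf).toNat], (d :: ds) ++ [cell],
                   pvLsi ((d :: ds) ++ [cell]), false) := by
              simp [pvStepB, hfull, hpos, hce, hlsic]
              rw [show d :: (ds ++ [cell]) = (d :: ds) ++ [cell] from rfl, pvLsi_append, hlsic]
              simp only [List.length_cons, beq_iff_eq]
              split_ifs <;> push_cast <;> omega
            rw [hstep]
            have h2 := ih (rows ++ [buf.take (pvLsi buf).toNat]) ((d :: ds) ++ [cell]) false
              (by simp only [List.length_append, List.length_cons, List.length_nil] at hclen ⊢; omega)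
              (by simp)
            rw [if_neg (by simp)] at h2
            rw [h2]
            simp [List.dropWhile_cons, hd]
        · -- hard break at wrap_width
          have hA : pvWrapA w (buf ++ cell :: rest') = buf :: pvWrapA w (cell :: rest') := by
            rw [pvWrapA]
            rw [dif_neg (by omega),
              dif_neg (by simp only [List.length_append, List.length_cons]; omega)]
            simp only [hsplit]
            rw [if_pos (by omega), htake, ← hfull, List.drop_left]
          have hstep : pvStepB w (rows, buf, pvLsi buf, false) cell
              = (rows ++ [buf], [cell], pvLsi [cell], false) := by
            simp [pvStepB, hfull, hpos, pvLsi_singleton]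
          rw [hstep, hA]
          have h2 := ih (rows ++ [buf]) [cell] false
            (by simp only [List.length_cons, List.length_nil]; omega) (by simp)
          rw [if_neg (by simp)] at h2
          rw [h2]
          simp
      · -- room in the buffer: just append the cell
        have hstep : pvStepB w (rows, buf, pvLsi buf, false) cell
            = (rows, buf ++ [cell], pvLsi (buf ++ [cell]), false) := by
          simp [pvStepB, hfull, pvLsi_append]
        rw [hstep]
        have h2 := ih rows (buf ++ [cell]) false
          (by simp only [List.length_append, List.length_cons, List.length_nil]; omega) (by simp)
        rw [if_neg (by simp)] at h2
        rw [h2]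
        simp

theorem pvWrapB_eq (w : Nat) (hw : 1 ≤ w) (cells : List String) :
    pvWrapB w cells = pvWrapA w cells := by
  have h := pv_main w hw cells [] [] false (by simp) (by simp)
  rw [if_neg (by simp)] at h
  simpa [pvWrapB, pvLsi] using h

theorem pvWrapA_ne_nil (w : Nat) (remaining : List String) : pvWrapA w remaining ≠ [] := by
  unfold pvWrapA
  split_ifs with h0 h1
  · simp
  · simp
  · by_cases hs : pvLastSpaceBelow remaining w ≤ 0 <;> simp [hs]

theorem pvWrapA_nil (w : Nat) : pvWrapA w [] = [[]] := by
  unfold pvWrapA; split_ifs <;> simp_all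

theorem pvGo_ne_nil (sep : List Char) :
    ∀ (fuel : Nat) (l cur : List Char) (acc : List (List Char)),
      PySem.Chars.splitOn.go sep fuel l cur acc ≠ [] := by
  intro fuel
  induction fuel with
  | zero => intro l cur acc; simp [PySem.Chars.splitOn.go]
  | succ f ih =>
    intro l cur acc
    cases l with
    | nil => simp [PySem.Chars.splitOn.go]
    | cons c rest =>
      simp only [PySem.Chars.splitOn.go]
      split <;> apply ih

theorem pvSplitOn_ne_nil (s sep : List Char) : PySem.Chars.splitOn s sep ≠ [] := by
  unfold PySem.Chars.splitOn
  apply pvGo_ne_nil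

theorem pvFlatMap_ne_nil {α β : Type} (g : α → List β) (l : List α) (hl : l ≠ [])
    (hg : ∀ x, g x ≠ []) : l.flatMap g ≠ [] := by
  cases l with
  | nil => exact absurd rfl hl
  | cons a as =>
    simp only [List.flatMap_cons, ne_eq, List.append_eq_nil_iff, not_and]
    intro h; exact absurd h (hg a)

-- ===== VERDICT (by name: the statement is the Claim_ definition above) =====
theorem text_to_braille_grid_spec : Claim_equal_text_to_braille_grid := by
  intro text mcpl _
  unfold Spec_text_to_braille_grid text_to_braille_grid text_to_braille_grid_alt
  have hlines : PySem.Chars.splitOn text.toList ['\n'] ≠ [] := pvSplitOn_ne_nil _ _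
  rcases mcpl with _ | n
  · -- no wrapping
    show (if (PySem.Chars.splitOn text.toList ['\n']).foldl
            (fun result line =>
              result ++ [(text_to_braille_chars line).map (fun c => String.ofList [c])]) [] = []
          then [[]]
          else (PySem.Chars.splitOn text.toList ['\n']).foldl
            (fun result line =>
              result ++ [(text_to_braille_chars line).map (fun c => String.ofList [c])]) [])
        = (PySem.Chars.splitOn text.toList ['\n']).foldl
            (fun grid line =>
              grid ++ [(text_to_braille_chars line).map (fun c => String.ofList [c])]) []
    rw [PySem.List.foldl_append_eq_flatMap]
    simp only [List.nil_append]
    rw [if_neg (pvFlatMap_ne_nil _ _ hlines (fun line => by simp))]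
  · by_cases hn : n ≠ 0 ∧ 0 < n
    · -- wrapping at n.toNat ≥ 1 cells
      have hw : 1 ≤ n.toNat := by omega
      show (if (PySem.Chars.splitOn text.toList ['\n']).foldl
              (fun result line =>
                let row := (text_to_braille_chars line).map (fun c => String.ofList [c])
                match (if n ≠ 0 ∧ 0 < n then some n else none : Option Int) with
                | none => result ++ [row]
                | some m =>
                  if row = [] then result ++ [[]]
                  else result ++ pvWrapA m.toNat row) [] = []
            then [[]]
            else (PySem.Chars.splitOn text.toList ['\n']).foldl
              (fun result line =>
                let row := (text_to_braille_chars line).map (fun c => String.ofList [c])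
                match (if n ≠ 0 ∧ 0 < n then some n else none : Option Int) with
                | none => result ++ [row]
                | some m =>
                  if row = [] then result ++ [[]]
                  else result ++ pvWrapA m.toNat row) [])
          = (PySem.Chars.splitOn text.toList ['\n']).foldl
              (fun grid line =>
                let cells := (text_to_braille_chars line).map (fun c => String.ofList [c])
                match (if n ≠ 0 ∧ 0 < n then some n else none : Option Int) with
                | none => grid ++ [cells]
                | some m => grid ++ pvWrapB m.toNat cells) []
      simp only [if_pos hn]
      have hbody : ∀ (acc : List (List String)) (line : List Char),
          (let row := (text_to_braille_chars line).map (fun c => String.ofList [c])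
           if row = [] then acc ++ [[]] else acc ++ pvWrapA n.toNat row)
          = acc ++ pvWrapB n.toNat ((text_to_braille_chars line).map (fun c => String.ofList [c])) := by
        intro acc line
        rw [pvWrapB_eq n.toNat hw]
        by_cases h : (text_to_braille_chars line).map (fun c => String.ofList [c]) = []
        · simp [h, pvWrapA_nil]
        · simp [h]
      rw [PySem.List.foldl_congr_mem _ _
        (fun acc line => acc ++ pvWrapB n.toNat ((text_to_braille_chars line).map (fun c => String.ofList [c]))) _
        (fun acc x _ => hbody acc x)]
      rw [PySem.List.foldl_append_eq_flatMap]
      simp only [List.nil_append]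
      rw [if_neg (pvFlatMap_ne_nil
        (fun line => pvWrapB n.toNat ((text_to_braille_chars line).map (fun c => String.ofList [c]))) _ hlines
        (fun line => by
          show pvWrapB n.toNat ((text_to_braille_chars line).map (fun c => String.ofList [c])) ≠ []
          rw [pvWrapB_eq n.toNat hw]; exact pvWrapA_ne_nil _ _))]
    · -- non-positive wrap argument: behaves like no wrapping
      show (if (PySem.Chars.splitOn text.toList ['\n']).foldl
              (fun result line =>
                let row := (text_to_braille_chars line).map (fun c => String.ofList [c])
                match (if n ≠ 0 ∧ 0 < n then some n else none : Option Int) with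
                | none => result ++ [row]
                | some m =>
                  if row = [] then result ++ [[]]
                  else result ++ pvWrapA m.toNat row) [] = []
            then [[]]
            else (PySem.Chars.splitOn text.toList ['\n']).foldl
              (fun result line =>
                let row := (text_to_braille_chars line).map (fun c => String.ofList [c])
                match (if n ≠ 0 ∧ 0 < n then some n else none : Option Int) with
                | none => result ++ [row]
                | some m =>
                  if row = [] then result ++ [[]]
                  else result ++ pvWrapA m.toNat row) [])
          = (PySem.Chars.splitOn text.toList ['\n']).foldl
              (fun grid line =>
                let cells := (text_to_braille_chars line).map (fun c => String.ofList [c])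
                match (if n ≠ 0 ∧ 0 < n then some n else none : Option Int) with
                | none => grid ++ [cells]
                | some m => grid ++ pvWrapB m.toNat cells) []
      simp only [if_neg hn]
      rw [PySem.List.foldl_append_eq_flatMap]
      simp only [List.nil_append]
      rw [if_neg (pvFlatMap_ne_nil _ _ hlines (fun line => by simp))]
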